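-- pv_equiv track=rewrite | github.com/fccoelho/jogos_vorazes | estrategias/Cecilia2.py | escolha_de_cacada
-- ===== SOURCE A (Python) =====
-- def escolha_de_cacada(rodada, comida_atual, reputacao_atual, m, reputacoes_dos_jogadores):
--     escolhas = []
--     ultimaescolha = 1
--     reputacoes_copia = reputacoes_dos_jogadores
--     reputacoes_ordenadas = list(reputacoes_copia)
--     reputacoes_ordenadas.sort()
--     p_30 = reputacoes_ordenadas[int((len(reputacoes_ordenadas)*0.30)-1)] #numero que define quem eu nao caco (baixa reputacao)
--     p_80 = reputacoes_ordenadas[int((len(reputacoes_ordenadas)*0.80)-1)] #numero que define quem eu nao caco (alta reputacao)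
--
--     if rodada == 1:
--         for i in range(0, len(reputacoes_dos_jogadores)):
--             if ultimaescolha > 0:
--                 escolhas.append('c')
--             else:
--                 escolhas.append('d')
--             ultimaescolha = ultimaescolha*(-1)
--     else:
--         for i in range(0, len(reputacoes_dos_jogadores)):
--             if reputacoes_dos_jogadores[i] < p_30 or reputacoes_dos_jogadores[i] >= p_80:
--                 escolhas.append('d')
--             else:
--                 escolhas.append('c')
--     return escolhas
-- ===== SOURCE B (Python) =====
-- def _select(xs, k):
--     # k-th smallest element (0-indexed) by three-way quickselect; no full sort
--     pivot = xs[len(xs) // 2]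
--     lo = [x for x in xs if x < pivot]
--     eq = [x for x in xs if x == pivot]
--     hi = [x for x in xs if x > pivot]
--     if k < len(lo):
--         return _select(lo, k)
--     if k < len(lo) + len(eq):
--         return pivot
--     return _select(hi, k - len(lo) - len(eq))
--
--
-- def escolha_de_cacada(rodada, comida_atual, reputacao_atual, m, reputacoes_dos_jogadores):
--     reps = reputacoes_dos_jogadores
--     n = len(reps)
--     # int(n*0.30 - 1) == max(0, (3*n - 10)//10) and int(n*0.80 - 1) == max(0, (8*n - 10)//10) for n >= 1
--     p_30 = _select(reps, max(0, (3 * n - 10) // 10))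
--     p_80 = _select(reps, max(0, (8 * n - 10) // 10))
--     if rodada == 1:
--         return ['c' if i % 2 == 0 else 'd' for i in range(n)]
--     return ['d' if r < p_30 or r >= p_80 else 'c' for r in reps]
-- ===== Notes on version B (the rewrite author's own statement) =====
-- stated objective: alternative
-- what changed: replaces full sort plus two percentile lookups by a three-way quickselect for the two order statistics, a closed-form alternating list for round 1, and a direct map over the reputations otherwise (the float index int(n*0.30-1) is computed by the exact integer formula max(0,(3n-10)//10))
-- outside the precondition, e.g. on escolha_de_cacada(1, 0, 0, 0, []): A raises IndexError, B raises IndexError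
import Mathlib
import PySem

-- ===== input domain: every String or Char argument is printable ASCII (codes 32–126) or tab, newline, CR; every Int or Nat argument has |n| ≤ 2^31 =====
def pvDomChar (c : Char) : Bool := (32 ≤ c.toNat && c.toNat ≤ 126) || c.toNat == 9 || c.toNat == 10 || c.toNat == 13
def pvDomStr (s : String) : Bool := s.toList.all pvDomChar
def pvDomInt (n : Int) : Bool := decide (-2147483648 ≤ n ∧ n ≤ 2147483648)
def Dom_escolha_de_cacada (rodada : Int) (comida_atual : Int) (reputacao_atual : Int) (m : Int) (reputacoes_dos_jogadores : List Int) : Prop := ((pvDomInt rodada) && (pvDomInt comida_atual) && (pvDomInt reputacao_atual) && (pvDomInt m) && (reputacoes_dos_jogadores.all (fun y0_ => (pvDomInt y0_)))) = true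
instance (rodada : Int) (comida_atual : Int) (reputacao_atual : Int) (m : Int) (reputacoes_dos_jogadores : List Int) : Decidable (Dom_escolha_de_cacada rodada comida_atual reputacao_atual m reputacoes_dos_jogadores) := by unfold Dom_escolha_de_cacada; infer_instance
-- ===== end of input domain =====

-- B replaces A's full sort + two percentile lookups by a three-way quickselect for the two
-- order statistics, a closed-form alternating list for round 1 and a direct map otherwise.

-- ===== PORT A =====
-- The float index int((n*0.30)-1) (resp. 0.80) is ported by hand as the Nat expression
-- (3*n - 10)/10 (truncated subtraction, i.e. Python's max(0, (3n-10)//10)): exact for every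
-- n >= 1 because the float product's relative error is below half an ulp and the exact value's
-- fractional part is a multiple of 1/10; for n = 0 Python raises IndexError (outside Pre_).
-- List indexing is ported with getD: under Pre_ every index used is in range.
def escolha_de_cacada (rodada : Int) (comida_atual : Int) (reputacao_atual : Int) (m : Int) (reputacoes_dos_jogadores : List Int) : List String :=
  let reputacoes_ordenadas := PySem.List.sorted reputacoes_dos_jogadores (fun x => x) false
  let n := reputacoes_dos_jogadores.length
  let p_30 := reputacoes_ordenadas.getD ((3 * n - 10) / 10) 0
  let p_80 := reputacoes_ordenadas.getD ((8 * n - 10) / 10) 0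
  if rodada = 1 then
    ((List.range n).foldl (fun (st : List String × Int) _ =>
      (st.1 ++ [if st.2 > 0 then "c" else "d"], st.2 * (-1))) ([], 1)).1
  else
    (List.range n).foldl (fun acc i =>
      acc ++ [if reputacoes_dos_jogadores.getD i 0 < p_30 ∨ reputacoes_dos_jogadores.getD i 0 ≥ p_80 then "d" else "c"]) []

-- ===== PORT B =====
-- a filtering list comprehension of Source B
def pvPart (xs : List Int) (p : Int → Bool) : List Int := xs.filter p

-- cited by pvSelect's decreasing_by: dropping a present element makes the filter strictly shorter
theorem pvFilterLt (p : Int → Bool) (l : List Int) (a : Int) (ha : a ∈ l) (hp : p a = false) :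
    (l.filter p).length < l.length := by
  induction l with
  | nil => cases ha
  | cons b t ih =>
    rcases List.mem_cons.mp ha with rfl | ha'
    · have h1 := List.length_filter_le p t
      simp only [List.filter_cons, hp, Bool.false_eq_true, List.length_cons, ite_false]
      omega
    · have h2 := ih ha'
      by_cases hb : p b
      · simp only [List.filter_cons, hb, if_pos, List.length_cons]
        omega
      · simp only [List.filter_cons, hb, Bool.false_eq_true, List.length_cons, ite_false]
        omega

theorem pvPartLt (xs : List Int) (p : Int → Bool) (a : Int) (ha : a ∈ xs) (hp : p a = false) :
    (pvPart xs p).length < xs.length := pvFilterLt p xs a ha hp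

-- cited by pvSelect's decreasing_by: the pivot is an element of the list
theorem pvGetDMem (xs : List Int) (i : Nat) (h : i < xs.length) : xs.getD i 0 ∈ xs := by
  rw [List.getD_eq_getElem _ _ h]
  exact List.getElem_mem h

-- k-th smallest (0-indexed) by three-way quickselect; B's Python raises IndexError on [],
-- here 0 (unreachable under Pre_).
def pvSelect (xs : List Int) (k : Nat) : Int :=
  if hx : xs = [] then 0
  else
    let pivot := xs.getD (xs.length / 2) 0
    let lo := pvPart xs (fun x => x < pivot)
    let eq := pvPart xs (fun x => x = pivot)
    let hi := pvPart xs (fun x => pivot < x)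
    if k < lo.length then pvSelect lo k
    else if k < lo.length + eq.length then pivot
    else pvSelect hi (k - lo.length - eq.length)
termination_by xs.length
decreasing_by
  · exact pvPartLt xs _ _ (pvGetDMem xs (xs.length / 2) (by
      have : xs.length ≠ 0 := fun h => hx (List.eq_nil_of_length_eq_zero h)
      omega)) (by simp)
  · exact pvPartLt xs _ _ (pvGetDMem xs (xs.length / 2) (by
      have : xs.length ≠ 0 := fun h => hx (List.eq_nil_of_length_eq_zero h)
      omega)) (by simp)

-- the integer index max(0, (3n-10)//10) of Source B is the Nat expression (3*n-10)/10, etc.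
def escolha_de_cacada_alt (rodada : Int) (comida_atual : Int) (reputacao_atual : Int) (m : Int) (reputacoes_dos_jogadores : List Int) : List String :=
  let n := reputacoes_dos_jogadores.length
  let p_30 := pvSelect reputacoes_dos_jogadores ((3 * n - 10) / 10)
  let p_80 := pvSelect reputacoes_dos_jogadores ((8 * n - 10) / 10)
  if rodada = 1 then
    (List.range n).map (fun i => if i % 2 = 0 then "c" else "d")
  else
    reputacoes_dos_jogadores.map (fun r => if r < p_30 ∨ r ≥ p_80 then "d" else "c")

-- ===== PRECONDITION & SPEC =====
-- Pre_ excludes only the empty list, on which A raises IndexError (index -1 into []).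
def Pre_escolha_de_cacada (rodada : Int) (comida_atual : Int) (reputacao_atual : Int) (m : Int) (reputacoes_dos_jogadores : List Int) : Prop := reputacoes_dos_jogadores ≠ []
instance (rodada : Int) (comida_atual : Int) (reputacao_atual : Int) (m : Int) (reputacoes_dos_jogadores : List Int) : Decidable (Pre_escolha_de_cacada rodada comida_atual reputacao_atual m reputacoes_dos_jogadores) := by unfold Pre_escolha_de_cacada; infer_instance

def pvWitness_escolha_de_cacada : Int × Int × Int × Int × List Int := (2, 0, 0, 0, [5, -1, 3])

def Spec_escolha_de_cacada (rodada : Int) (comida_atual : Int) (reputacao_atual : Int) (m : Int) (reputacoes_dos_jogadores : List Int) (out : List String) : Prop := out = escolha_de_cacada_alt rodada comida_atual reputacao_atual m reputacoes_dos_jogadores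
instance (rodada : Int) (comida_atual : Int) (reputacao_atual : Int) (m : Int) (reputacoes_dos_jogadores : List Int) (out : List String) : Decidable (Spec_escolha_de_cacada rodada comida_atual reputacao_atual m reputacoes_dos_jogadores out) := by unfold Spec_escolha_de_cacada; infer_instance

-- ===== CLAIM (what is proved, stated in full; the proofs are below) =====
def Claim_equal_escolha_de_cacada : Prop := ∀ (rodada : Int) (comida_atual : Int) (reputacao_atual : Int) (m : Int) (reputacoes_dos_jogadores : List Int), Dom_escolha_de_cacada rodada comida_atual reputacao_atual m reputacoes_dos_jogadores → Pre_escolha_de_cacada rodada comida_atual reputacao_atual m reputacoes_dos_jogadores → Spec_escolha_de_cacada rodada comida_atual reputacao_atual m reputacoes_dos_jogadores (escolha_de_cacada rodada comida_atual reputacao_atual m reputacoes_dos_jogadores)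

-- ===== LEMMAS AND PROOFS =====

theorem pvWitness_ok :
    Dom_escolha_de_cacada pvWitness_escolha_de_cacada.1 pvWitness_escolha_de_cacada.2.1
      pvWitness_escolha_de_cacada.2.2.1 pvWitness_escolha_de_cacada.2.2.2.1
      pvWitness_escolha_de_cacada.2.2.2.2 ∧
    Pre_escolha_de_cacada pvWitness_escolha_de_cacada.1 pvWitness_escolha_de_cacada.2.1
      pvWitness_escolha_de_cacada.2.2.1 pvWitness_escolha_de_cacada.2.2.2.1
      pvWitness_escolha_de_cacada.2.2.2.2 := by
  constructor
  · decide
  · decide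

-- the three-way partition by a pivot is a permutation of the list
theorem pvPermThree (xs : List Int) (pv : Int) :
    (pvPart xs (fun x => x < pv) ++ (pvPart xs (fun x => x = pv) ++ pvPart xs (fun x => pv < x))).Perm xs := by
  unfold pvPart
  induction xs with
  | nil => simp
  | cons a t ih =>
    rcases lt_trichotomy a pv with h | h | h
    · simpa [List.filter_cons, h, not_lt.mpr h.le, h.ne] using ih.cons a
    · subst h
      simp only [List.filter_cons, lt_irrefl, decide_false, decide_true,
        Bool.false_eq_true, ite_false, ite_true, List.cons_append]
      exact List.perm_middle.trans (ih.cons a)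
    · have h1 : ¬ a < pv := not_lt.mpr h.le
      have h2 : ¬ a = pv := (ne_of_gt h)
      simp only [List.filter_cons, h, h1, h2, decide_false, decide_true,
        Bool.false_eq_true, ite_false, ite_true]
      rw [← List.append_assoc]
      refine List.perm_middle.trans (List.Perm.cons a ?_)
      rw [List.append_assoc]
      exact ih

-- sorted(xs) is sorted(lo) ++ eq ++ sorted(hi) for the three-way partition at any pivot
theorem pvSortedSplit (xs : List Int) (pv : Int) :
    PySem.List.sorted xs (fun x => x) false
      = PySem.List.sorted (pvPart xs (fun x => x < pv)) (fun x => x) false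
        ++ (pvPart xs (fun x => x = pv)
        ++ PySem.List.sorted (pvPart xs (fun x => pv < x)) (fun x => x) false) := by
  have hperm : (PySem.List.sorted (pvPart xs (fun x => x < pv)) (fun x => x) false
      ++ (pvPart xs (fun x => x = pv)
      ++ PySem.List.sorted (pvPart xs (fun x => pv < x)) (fun x => x) false)).Perm xs := by
    refine List.Perm.trans ?_ (pvPermThree xs pv)
    exact (PySem.List.sorted_perm _ _ _).append
      ((List.Perm.refl _).append (PySem.List.sorted_perm _ _ _))
  have hlo : ∀ y ∈ PySem.List.sorted (pvPart xs (fun x => x < pv)) (fun x => x) false, y < pv := by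
    intro y hy
    rw [PySem.List.mem_sorted] at hy
    exact of_decide_eq_true (List.mem_filter.mp hy).2
  have heq : ∀ y ∈ pvPart xs (fun x => x = pv), y = pv := by
    intro y hy
    exact of_decide_eq_true (List.mem_filter.mp hy).2
  have hhi : ∀ y ∈ PySem.List.sorted (pvPart xs (fun x => pv < x)) (fun x => x) false, pv < y := by
    intro y hy
    rw [PySem.List.mem_sorted] at hy
    exact of_decide_eq_true (List.mem_filter.mp hy).2
  have hpw : (PySem.List.sorted (pvPart xs (fun x => x < pv)) (fun x => x) false
      ++ (pvPart xs (fun x => x = pv)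
      ++ PySem.List.sorted (pvPart xs (fun x => pv < x)) (fun x => x) false)).Pairwise (· ≤ ·) := by
    rw [List.pairwise_append]
    refine ⟨by simpa using PySem.List.sorted_pairwise (pvPart xs (fun x => x < pv)) (fun x => x), ?_, ?_⟩
    · rw [List.pairwise_append]
      refine ⟨List.pairwise_of_forall_mem_list ?_,
        by simpa using PySem.List.sorted_pairwise (pvPart xs (fun x => pv < x)) (fun x => x), ?_⟩
      · intro a ha b hb
        rw [heq a ha, heq b hb]
      · intro a ha b hb
        rw [heq a ha]
        exact (hhi b hb).le
    · intro a ha b hb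
      rcases List.mem_append.mp hb with hb | hb
      · rw [heq b hb]
        exact (hlo a ha).le
      · exact ((hlo a ha).trans (hhi b hb)).le
  exact PySem.List.sorted_id_eq_of_perm_of_pairwise _ _ hperm hpw

-- quickselect returns the k-th element of the sorted list
theorem pvSelect_correct_fuel : ∀ (n : Nat) (xs : List Int), xs.length ≤ n → ∀ k, k < xs.length →
    pvSelect xs k = (PySem.List.sorted xs (fun x => x) false).getD k 0 := by
  intro n
  induction n with
  | zero =>
    intro xs hle k hk
    omega
  | succ n ih =>
    intro xs hle k hk
    have hx : xs ≠ [] := by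
      intro h; subst h; simp at hk
    rw [pvSelect, dif_neg hx]
    simp only []
    set pv := xs.getD (xs.length / 2) 0 with hpv
    have hpvmem : pv ∈ xs := pvGetDMem xs (xs.length / 2) (by
      have : xs.length ≠ 0 := fun h => hx (List.eq_nil_of_length_eq_zero h)
      omega)
    have hlolt : (pvPart xs (fun x => x < pv)).length < xs.length :=
      pvPartLt xs _ _ hpvmem (by simp)
    have hhilt : (pvPart xs (fun x => pv < x)).length < xs.length :=
      pvPartLt xs _ _ hpvmem (by simp)
    have hlenS : (PySem.List.sorted (pvPart xs (fun x => x < pv)) (fun x => x) false).length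
        = (pvPart xs (fun x => x < pv)).length :=
      (PySem.List.sorted_perm _ _ _).length_eq
    have hlenH : (PySem.List.sorted (pvPart xs (fun x => pv < x)) (fun x => x) false).length
        = (pvPart xs (fun x => pv < x)).length :=
      (PySem.List.sorted_perm _ _ _).length_eq
    have htot : (pvPart xs (fun x => x < pv)).length
        + ((pvPart xs (fun x => x = pv)).length + (pvPart xs (fun x => pv < x)).length)
        = xs.length := by
      have h := (pvPermThree xs pv).length_eq
      simpa using h
    rw [pvSortedSplit xs pv]
    by_cases h1 : k < (pvPart xs (fun x => x < pv)).length
    · rw [if_pos h1, List.getD_append _ _ _ _ (by omega)]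
      exact ih (pvPart xs (fun x => x < pv)) (by omega) k h1
    · rw [if_neg h1]
      by_cases h2 : k < (pvPart xs (fun x => x < pv)).length + (pvPart xs (fun x => x = pv)).length
      · rw [if_pos h2, List.getD_append_right _ _ _ _ (by omega), hlenS,
          List.getD_append _ _ _ _ (by omega)]
        have hkl : k - (pvPart xs (fun x => x < pv)).length < (pvPart xs (fun x => x = pv)).length := by
          omega
        rw [List.getD_eq_getElem _ _ hkl]
        have hm : (pvPart xs (fun x => x = pv))[k - (pvPart xs (fun x => x < pv)).length] ∈
            pvPart xs (fun x => x = pv) := List.getElem_mem hkl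
        exact (of_decide_eq_true (List.mem_filter.mp hm).2).symm
      · rw [if_neg h2, List.getD_append_right _ _ _ _ (by omega), hlenS,
          List.getD_append_right _ _ _ _ (by omega)]
        have hk3 : k - (pvPart xs (fun x => x < pv)).length - (pvPart xs (fun x => x = pv)).length
            < (pvPart xs (fun x => pv < x)).length := by omega
        rw [ih (pvPart xs (fun x => pv < x)) (by omega) _ hk3]

theorem pvSelect_correct (xs : List Int) (k : Nat) (hk : k < xs.length) :
    pvSelect xs k = (PySem.List.sorted xs (fun x => x) false).getD k 0 :=
  pvSelect_correct_fuel xs.length xs le_rfl k hk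

-- round-1 loop: the accumulator is the alternating prefix, the sign tracks the parity
theorem pvLoopA (n : Nat) :
    (List.range n).foldl (fun (st : List String × Int) _ =>
      (st.1 ++ [if st.2 > 0 then "c" else "d"], st.2 * (-1))) ([], 1)
    = ((List.range n).map (fun i => if i % 2 = 0 then "c" else "d"),
       if n % 2 = 0 then (1 : Int) else -1) := by
  induction n with
  | zero => simp
  | succ n ih =>
    rw [List.range_succ, List.foldl_append, ih, List.map_append]
    simp only [List.foldl_cons, List.foldl_nil, List.map_cons, List.map_nil]
    rcases Nat.even_or_odd n with h | h
    · have h0 : n % 2 = 0 := Nat.even_iff.mp h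
      have h1 : (n + 1) % 2 = 1 := by omega
      norm_num [h0, h1]
    · have h0 : n % 2 = 1 := Nat.odd_iff.mp h
      have h1 : (n + 1) % 2 = 0 := by omega
      norm_num [h0, h1]

theorem pvMapIdx (xs : List Int) (g : Int → String) :
    (List.range xs.length).map (fun i => g (xs.getD i 0)) = xs.map g := by
  apply List.ext_getElem
  · simp
  · intro i h1 h2
    simp only [List.getElem_map, List.getElem_range]
    rw [List.getD_eq_getElem _ _ (by simpa using h1)]

-- ===== VERDICT (by name: the statement is the Claim_ definition above) =====
theorem escolha_de_cacada_spec : Claim_equal_escolha_de_cacada := by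
  intro rodada comida reputacao m reps _ hpre
  unfold Spec_escolha_de_cacada escolha_de_cacada escolha_de_cacada_alt
  simp only []
  have hn : 0 < reps.length := List.length_pos_iff.mpr hpre
  have h30 : (3 * reps.length - 10) / 10 < reps.length := by omega
  have h80 : (8 * reps.length - 10) / 10 < reps.length := by omega
  rw [pvSelect_correct reps _ h30, pvSelect_correct reps _ h80]
  by_cases hr : rodada = 1
  · simp only [if_pos hr, pvLoopA]
  · rw [if_neg hr, if_neg hr]
    rw [PySem.List.foldl_append_singleton_eq_map]
    rw [List.nil_append]
    exact pvMapIdx reps (fun r => if r < (PySem.List.sorted reps (fun x => x) false).getD ((3 * reps.length - 10) / 10) 0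
          ∨ r ≥ (PySem.List.sorted reps (fun x => x) false).getD ((8 * reps.length - 10) / 10) 0
          then "d" else "c")
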